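-- pv_equiv track=rewrite | github.com/ABCTreebank/abctk.obj | abctk/obj/comparative.py | _mod_token
-- ===== SOURCE A (Python) =====
-- from typing import Iterable, TextIO, TypedDict, Optional, Sequence, Tuple, NamedTuple, DefaultDict, List, Dict, Match
--
-- class _CompFeatBracket(NamedTuple):
--     label: str
--     is_start: bool
--
-- def _mod_token(
--     token: str,
--     feats: Iterable[_CompFeatBracket]
-- ) -> str:
--     for label, is_start in feats:
--         if is_start:
--             token = f"[{token}"
--         else:
--             token = f"{token}]{label}"
--     return token
-- ===== SOURCE B (Python) =====
-- def _mod_token(token, feats):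
--     fs = list(feats)
--     n = sum(1 for _, is_start in fs if is_start)
--     suffix = "".join(f"]{label}" for label, is_start in fs if not is_start)
--     return "[" * n + token + suffix
-- ===== Notes on version B (the rewrite author's own statement) =====
-- stated objective: simpler
-- what changed: Replaces the interleaved feature-by-feature string rebuilding with a closed-form prefix '[' * (count of start features) plus one join over the non-start features, concatenated once around the token.
import Mathlib
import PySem

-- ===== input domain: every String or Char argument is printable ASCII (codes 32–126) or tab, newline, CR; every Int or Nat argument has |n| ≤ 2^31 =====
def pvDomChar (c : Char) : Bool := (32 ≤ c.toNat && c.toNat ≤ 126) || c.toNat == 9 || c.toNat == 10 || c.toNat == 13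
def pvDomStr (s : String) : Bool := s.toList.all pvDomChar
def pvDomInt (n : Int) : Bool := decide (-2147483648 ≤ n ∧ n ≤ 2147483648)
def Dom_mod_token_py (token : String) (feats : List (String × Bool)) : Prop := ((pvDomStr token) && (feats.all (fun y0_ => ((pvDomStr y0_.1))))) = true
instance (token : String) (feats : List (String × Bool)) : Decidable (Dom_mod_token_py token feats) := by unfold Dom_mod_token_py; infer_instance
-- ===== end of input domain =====

-- B builds the result in one shot — a closed-form '[' prefix ('[' * count of start features)
-- plus one join over the non-start features — instead of A's feature-by-feature rebuilding
-- of the token. Objective: simpler.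

-- ===== PORT A =====
def mod_token_py (token : String) (feats : List (String × Bool)) : String :=
  feats.foldl
    (fun tok lf => if lf.2 then "[" ++ tok else tok ++ "]" ++ lf.1)
    token

-- ===== PORT B =====
def mod_token_py_alt (token : String) (feats : List (String × Bool)) : String :=
  -- fs = list(feats); n = number of start features
  let n := (feats.filter (fun p => p.2)).length
  -- '[' * n
  let prefix_ := String.ofList (List.replicate n '[')
  -- "".join(f"]{label}" for non-start features, in order)
  let suffix := PySem.Str.join "" ((feats.filter (fun p => !p.2)).map (fun p => "]" ++ p.1))
  prefix_ ++ token ++ suffix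

-- ===== PRECONDITION & SPEC =====
def Spec_mod_token_py (token : String) (feats : List (String × Bool)) (out : String) : Prop := out = mod_token_py_alt token feats
instance (token : String) (feats : List (String × Bool)) (out : String) : Decidable (Spec_mod_token_py token feats out) := by unfold Spec_mod_token_py; infer_instance

-- ===== CLAIM (what is proved, stated in full; the proofs are below) =====
def Claim_equal_mod_token_py : Prop := ∀ (token : String) (feats : List (String × Bool)), Dom_mod_token_py token feats → Spec_mod_token_py token feats (mod_token_py token feats)

-- ===== LEMMAS AND PROOFS =====

-- "".join over List Char lists is flatten
theorem chars_join_nil_sep (parts : List (List Char)) :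
    PySem.Chars.join [] parts = parts.flatten := by
  induction parts with
  | nil => simp [PySem.Chars.join, List.intercalate]
  | cons x xs ih =>
    cases xs with
    | nil => simp [PySem.Chars.join, List.intercalate]
    | cons y ys =>
      simp only [PySem.Chars.join, List.intercalate, List.intersperse] at ih ⊢
      simp [ih]

theorem replicate_append_cons (n : Nat) (c : Char) (l : List Char) :
    List.replicate n c ++ c :: l = c :: (List.replicate n c ++ l) := by
  induction n with
  | zero => simp
  | succ m ih => simp [List.replicate_succ, ih]

-- characterisation of B at the character level
theorem alt_toList (token : String) (feats : List (String × Bool)) :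
    (mod_token_py_alt token feats).toList =
      List.replicate (feats.filter (fun p => p.2)).length '[' ++ token.toList ++
        ((feats.filter (fun p => !p.2)).map (fun p => ']' :: p.1.toList)).flatten := by
  simp [mod_token_py_alt, PySem.Str.toList_join, chars_join_nil_sep,
    Function.comp_def]

theorem mod_token_eq (feats : List (String × Bool)) (token : String) :
    mod_token_py token feats = mod_token_py_alt token feats := by
  induction feats generalizing token with
  | nil =>
    apply String.toList_injective
    simp [mod_token_py, alt_toList]
  | cons p rest ih =>
    obtain ⟨label, b⟩ := p
    cases b with
    | true =>
      have h := ih ("[" ++ token)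
      simp only [mod_token_py, List.foldl_cons, if_true] at h ⊢
      rw [h]
      apply String.toList_injective
      simp [alt_toList, List.replicate_succ, replicate_append_cons]
    | false =>
      have h := ih (token ++ "]" ++ label)
      simp only [mod_token_py, List.foldl_cons, Bool.false_eq_true, if_false] at h ⊢
      rw [h]
      apply String.toList_injective
      simp [alt_toList]

-- ===== VERDICT (by name: the statement is the Claim_ definition above) =====
theorem mod_token_py_spec : Claim_equal_mod_token_py := by
  intro token feats _
  exact mod_token_eq feats token
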